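-- pv_equiv track=rewrite | github.com/KusakabeShi/babeld-ibgp-generator | generate_config_func.py | allocate_port
-- ===== SOURCE A (Python) =====
-- def allocate_port(id,id2,port_db,port_base):
--     if id not in port_db:
--         port_db[id] = { id2: port_base }
--         return port_db[id][id2]
--     elif id2 not in port_db[id]:
--         for p in range(port_base, 65535):
--             pfound = False
--             for _,usedp in port_db[id].items():
--                 if p == usedp:
--                     pfound = True
--                     break
--             if pfound == False:
--                 port_db[id][id2] = p
--                 return port_db[id][id2]
--     return port_db[id][id2]
-- ===== SOURCE B (Python) =====
-- def allocate_port(id, id2, port_db, port_base):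
--     if id not in port_db:
--         port_db[id] = {id2: port_base}
--         return port_base
--     if id2 not in port_db[id]:
--         # smallest free port >= port_base: sort the relevant used ports once,
--         # then advance a single candidate pointer through them.
--         candidate = port_base
--         for u in sorted(v for v in port_db[id].values() if v >= port_base):
--             if u == candidate:
--                 candidate += 1
--             elif u > candidate:
--                 break
--         if candidate < 65535:
--             port_db[id][id2] = candidate
--             return candidate
--     return port_db[id][id2]
-- ===== Notes on version B (the rewrite author's own statement) =====
-- stated objective: alternative
-- what changed: A scans every candidate port from port_base upward and for each one rescans all used ports; B sorts the used ports >= port_base once and finds the smallest free port in a single walk with a candidate pointer.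
import Mathlib
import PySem

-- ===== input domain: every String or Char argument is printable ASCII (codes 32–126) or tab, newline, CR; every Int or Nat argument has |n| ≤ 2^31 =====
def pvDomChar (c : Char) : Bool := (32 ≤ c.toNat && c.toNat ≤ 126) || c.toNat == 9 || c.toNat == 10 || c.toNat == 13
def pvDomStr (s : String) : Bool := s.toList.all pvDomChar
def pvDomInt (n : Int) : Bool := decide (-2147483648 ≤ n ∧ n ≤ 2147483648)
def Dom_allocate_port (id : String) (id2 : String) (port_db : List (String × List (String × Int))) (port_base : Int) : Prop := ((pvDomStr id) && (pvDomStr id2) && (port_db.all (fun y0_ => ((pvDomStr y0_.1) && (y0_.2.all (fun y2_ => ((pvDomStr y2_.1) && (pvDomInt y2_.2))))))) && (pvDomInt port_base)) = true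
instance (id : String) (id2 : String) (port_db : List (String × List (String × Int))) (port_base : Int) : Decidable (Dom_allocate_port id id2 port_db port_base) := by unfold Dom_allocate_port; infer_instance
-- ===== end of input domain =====

-- B replaces A's candidate-by-candidate rescan of the used ports by sorting the
-- used ports ≥ port_base once and walking them with a single candidate pointer
-- (objective: alternative algorithm). Both Pythons mutate port_db identically;
-- the equivalence proved here is about the RETURN value.

-- ===== PORT A =====
-- 'for _, usedp in port_db[id].items(): if p == usedp: pfound = True; break'
def pvUsedA (inner : List (String × Int)) (p : Int) : Bool :=
  inner.any (fun kv => p == kv.2)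

-- 'for p in range(port_base, 65535): … if pfound == False: return p' — the loop as
-- a recursion on p (none = the loop exhausted without returning)
def pvLoopA (inner : List (String × Int)) (p : Int) : Option Int :=
  if _h : p < 65535 then
    if pvUsedA inner p then pvLoopA inner (p + 1) else some p
  else none
termination_by (65535 - p).toNat
decreasing_by omega

def allocate_port (id : String) (id2 : String) (port_db : List (String × List (String × Int))) (port_base : Int) : Int :=
  match port_db.lookup id with
  | none => port_base                 -- port_db[id] = {id2: port_base}; return port_db[id][id2]
  | some inner =>
    match inner.lookup id2 with
    | some v => v                     -- final 'return port_db[id][id2]'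
    | none =>
      match pvLoopA inner port_base with
      | some p => p                   -- port_db[id][id2] = p; return port_db[id][id2]
      | none => 0                     -- fall-through 'return port_db[id][id2]' raises KeyError; excluded by Pre_

-- ===== PORT B =====
-- walk the sorted used list with a candidate pointer ('elif u > candidate: break')
def pvWalkB (candidate : Int) : List Int → Int
  | [] => candidate
  | u :: rest =>
    if u == candidate then pvWalkB (candidate + 1) rest
    else if candidate < u then candidate
    else pvWalkB candidate rest

def allocate_port_alt (id : String) (id2 : String) (port_db : List (String × List (String × Int))) (port_base : Int) : Int :=
  match port_db.lookup id with
  | none => port_base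
  | some inner =>
    match inner.lookup id2 with
    | some v => v
    | none =>
      let used := PySem.List.sorted ((inner.map Prod.snd).filter (fun v => decide (port_base ≤ v))) (fun x => x)
      let c := pvWalkB port_base used
      if c < 65535 then c
      else 0                          -- fall-through 'return port_db[id][id2]' raises KeyError; excluded by Pre_

-- ===== PRECONDITION & SPEC =====
-- Pre_ excludes exactly the inputs on which A raises KeyError: id is present,
-- id2 is absent, and every port of [port_base, 65535) is already used for id
-- (in particular port_base ≥ 65535); B raises KeyError there too.
def Pre_allocate_port (id : String) (id2 : String) (port_db : List (String × List (String × Int))) (port_base : Int) : Prop :=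
  ∀ inner ∈ (port_db.lookup id).toList, inner.lookup id2 = none →
    ∃ k ∈ List.range (inner.length + 1),
      port_base + (k : Int) < 65535 ∧ (port_base + (k : Int)) ∉ inner.map Prod.snd

instance (id : String) (id2 : String) (port_db : List (String × List (String × Int))) (port_base : Int) : Decidable (Pre_allocate_port id id2 port_db port_base) := by
  unfold Pre_allocate_port; infer_instance

def pvWitness_allocate_port : String × String × (List (String × List (String × Int))) × Int :=
  ("r1", "r2", [("r1", [("r2", 5000), ("r3", 5001)])], 5000)

def Spec_allocate_port (id : String) (id2 : String) (port_db : List (String × List (String × Int))) (port_base : Int) (out : Int) : Prop := out = allocate_port_alt id id2 port_db port_base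
instance (id : String) (id2 : String) (port_db : List (String × List (String × Int))) (port_base : Int) (out : Int) : Decidable (Spec_allocate_port id id2 port_db port_base out) := by unfold Spec_allocate_port; infer_instance

-- ===== CLAIM (what is proved, stated in full; the proofs are below) =====
def Claim_equal_allocate_port : Prop := ∀ (id : String) (id2 : String) (port_db : List (String × List (String × Int))) (port_base : Int), Dom_allocate_port id id2 port_db port_base → Pre_allocate_port id id2 port_db port_base → Spec_allocate_port id id2 port_db port_base (allocate_port id id2 port_db port_base)

-- ===== LEMMAS AND PROOFS =====

lemma pvUsedA_iff (inner : List (String × Int)) (x : Int) :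
    pvUsedA inner x = true ↔ x ∈ inner.map Prod.snd := by
  simp only [pvUsedA, List.any_eq_true, beq_iff_eq, List.mem_map]
  constructor
  · rintro ⟨kv, hkv, h⟩; exact ⟨kv, hkv, h.symm⟩
  · rintro ⟨kv, hkv, h⟩; exact ⟨kv, hkv, h.symm⟩

-- B's walk over a sorted list computes the least value ≥ candidate missing from the list
lemma pvWalkB_spec (S : List Int) : ∀ c : Int, S.Pairwise (· ≤ ·) →
    c ≤ pvWalkB c S ∧ pvWalkB c S ∉ S ∧ ∀ d, c ≤ d → d < pvWalkB c S → d ∈ S := by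
  induction S with
  | nil => intro c _; simp [pvWalkB]
  | cons u rest ih =>
    intro c hp
    have hrest : rest.Pairwise (· ≤ ·) := hp.of_cons
    have hub : ∀ x ∈ rest, u ≤ x := by
      intro x hx; exact (List.pairwise_cons.mp hp).1 x hx
    by_cases h1 : u = c
    · have ⟨ihle, ihnm, ihall⟩ := ih (c + 1) hrest
      simp only [pvWalkB, h1, beq_self_eq_true, if_true]
      refine ⟨by omega, ?_, ?_⟩
      · intro hmem
        rcases List.mem_cons.mp hmem with h | h
        · omega
        · exact ihnm h
      · intro d hd1 hd2
        by_cases hdc : d = c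
        · subst hdc; exact List.mem_cons_self
        · exact List.mem_cons_of_mem _ (ihall d (by omega) hd2)
    · simp only [pvWalkB, beq_iff_eq, h1, if_false]
      by_cases h2 : c < u
      · simp only [h2, if_true]
        refine ⟨le_refl c, ?_, ?_⟩
        · intro hmem
          rcases List.mem_cons.mp hmem with h | h
          · omega
          · have := hub c h; omega
        · intro d hd1 hd2; omega
      · simp only [h2, if_false]
        have ⟨ihle, ihnm, ihall⟩ := ih c hrest
        refine ⟨ihle, ?_, ?_⟩
        · intro hmem
          rcases List.mem_cons.mp hmem with h | h
          · omega
          · exact ihnm h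
        · intro d hd1 hd2
          exact List.mem_cons_of_mem _ (ihall d hd1 hd2)

-- A's loop, given the least free port r ≥ a, returns r iff r < 65535
lemma pvLoopA_spec (inner : List (String × Int)) (r : Int)
    (hfree : pvUsedA inner r = false) :
    ∀ n : Nat, ∀ a : Int, (r - a).toNat ≤ n → a ≤ r →
    (∀ d, a ≤ d → d < r → pvUsedA inner d = true) →
    pvLoopA inner a = if r < 65535 then some r else none := by
  intro n
  induction n with
  | zero =>
    intro a hn ha _
    have : a = r := by omega
    subst this
    rw [pvLoopA]
    by_cases h : a < 65535
    · simp [h, hfree]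
    · simp [h]
  | succ m ih =>
    intro a hn ha hall
    by_cases hra : a = r
    · subst hra
      rw [pvLoopA]
      by_cases h : a < 65535
      · simp [h, hfree]
      · simp [h]
    · have halt : a < r := by omega
      rw [pvLoopA]
      by_cases h : a < 65535
      · have hu : pvUsedA inner a = true := hall a (le_refl a) halt
        simp only [h, dif_pos, hu, if_true]
        exact ih (a + 1) (by omega) (by omega) (fun d hd1 hd2 => hall d (by omega) hd2)
      · have hr65 : ¬ r < 65535 := by omega
        simp [h, hr65]

-- the two search branches agree
lemma pv_branch_eq (inner : List (String × Int)) (base : Int) :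
    (match pvLoopA inner base with | some p => p | none => 0)
    = (if pvWalkB base (PySem.List.sorted ((inner.map Prod.snd).filter (fun v => decide (base ≤ v))) (fun x => x)) < 65535
       then pvWalkB base (PySem.List.sorted ((inner.map Prod.snd).filter (fun v => decide (base ≤ v))) (fun x => x))
       else 0) := by
  set S := PySem.List.sorted ((inner.map Prod.snd).filter (fun v => decide (base ≤ v))) (fun x => x) with hS
  have hpair : S.Pairwise (· ≤ ·) := by
    simpa using PySem.List.sorted_pairwise ((inner.map Prod.snd).filter (fun v => decide (base ≤ v))) (fun x => x)
  have hmem : ∀ x : Int, x ∈ S ↔ (x ∈ inner.map Prod.snd ∧ base ≤ x) := by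
    intro x
    rw [hS, PySem.List.mem_sorted, List.mem_filter]
    simp
  obtain ⟨hle, hnm, hall⟩ := pvWalkB_spec S base hpair
  set r := pvWalkB base S with hr
  have hfree : pvUsedA inner r = false := by
    rw [← Bool.not_eq_true, pvUsedA_iff]
    intro hmem'
    exact hnm ((hmem r).mpr ⟨hmem', hle⟩)
  have hused : ∀ d, base ≤ d → d < r → pvUsedA inner d = true := by
    intro d h1 h2
    rw [pvUsedA_iff]
    exact ((hmem d).mp (hall d h1 h2)).1
  have hloop := pvLoopA_spec inner r hfree (r - base).toNat base (le_refl _) hle hused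
  rw [hloop]
  by_cases h : r < 65535
  · simp [h]
  · simp [h]

-- ===== VERDICT (by name: the statement is the Claim_ definition above) =====
theorem allocate_port_spec : Claim_equal_allocate_port := by
  intro id id2 port_db port_base _hdom _hpre
  unfold Spec_allocate_port allocate_port allocate_port_alt
  cases hdb : port_db.lookup id with
  | none => rfl
  | some inner =>
    dsimp only
    cases hin : inner.lookup id2 with
    | some v => rfl
    | none =>
      dsimp only
      exact pv_branch_eq inner port_base
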